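-- pv_equiv track=rewrite | github.com/Mbertelotti/Modulo_MF | labdocu_libD/text.py | list_alfanumeric
-- ===== SOURCE A (Python) =====
-- def list_alfanumeric(list):
--     new_list=[]
--     for palabra in list:
--         nueva_palabra=""
--         for caracter in palabra:
--             if caracter.isalpha() or caracter.isnumeric():
--                 nueva_palabra=nueva_palabra+caracter
--             else:
--                 nueva_palabra=nueva_palabra+" "
--         if nueva_palabra!="":
--             if " " not in nueva_palabra:
--                 new_list.append(nueva_palabra)
--             else:
--                 cadena=nueva_palabra.split(" ")
--                 for elemento in cadena:
--                     if elemento!="":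
--                         new_list.append(elemento)
--     return new_list
-- ===== SOURCE B (Python) =====
-- def list_alfanumeric(list):
--     new_list = []
--     for palabra in list:
--         buf = ""
--         for caracter in palabra:
--             if caracter.isalpha() or caracter.isnumeric():
--                 buf += caracter
--             else:
--                 if buf:
--                     new_list.append(buf)
--                 buf = ""
--         if buf:
--             new_list.append(buf)
--     return new_list
-- ===== Notes on version B (the rewrite author's own statement) =====
-- stated objective: simpler
-- what changed: B extracts alphanumeric runs in one left-to-right pass with a token buffer, instead of building a space-masked copy of each word and then splitting it on spaces and filtering empty pieces.
import Mathlib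
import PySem

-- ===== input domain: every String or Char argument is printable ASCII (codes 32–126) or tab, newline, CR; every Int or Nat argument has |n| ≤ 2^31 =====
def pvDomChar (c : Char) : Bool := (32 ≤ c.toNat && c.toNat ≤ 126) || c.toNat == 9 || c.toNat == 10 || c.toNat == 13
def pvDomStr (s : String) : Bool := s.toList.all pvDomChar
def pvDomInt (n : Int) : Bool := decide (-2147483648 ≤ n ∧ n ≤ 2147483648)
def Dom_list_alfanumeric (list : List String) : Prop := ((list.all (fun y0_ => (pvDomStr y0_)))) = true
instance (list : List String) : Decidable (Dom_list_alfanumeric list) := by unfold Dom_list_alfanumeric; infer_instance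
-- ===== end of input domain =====

-- B extracts alphanumeric runs in one pass with a token buffer instead of A's mask-then-split-then-filter; same results, simpler decomposition.


-- ===== PORT A =====
-- caracter.isnumeric() is ported as PySem.Chars.isdigit — exactly equal on the ASCII domain.
def list_alfanumeric (list : List String) : List String :=
  list.foldl (fun new_list palabra =>
    let nueva_palabra : List Char :=
      palabra.toList.foldl (fun np caracter =>
        if PySem.Chars.isalpha caracter || PySem.Chars.isdigit caracter then np ++ [caracter]
        else np ++ [' ']) []
    if nueva_palabra ≠ [] then
      if PySem.Chars.isIn [' '] nueva_palabra = false then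
        new_list ++ [String.ofList nueva_palabra]
      else
        (PySem.Chars.splitOn nueva_palabra [' ']).foldl
          (fun nl elemento => if elemento ≠ [] then nl ++ [String.ofList elemento] else nl) new_list
    else new_list) []

-- ===== PORT B =====
def list_alfanumeric_alt (list : List String) : List String :=
  list.foldl (fun new_list palabra =>
    let st := palabra.toList.foldl (fun (st : List String × List Char) caracter =>
      if PySem.Chars.isalnum caracter then (st.1, st.2 ++ [caracter])
      else if st.2 ≠ [] then (st.1 ++ [String.ofList st.2], ([] : List Char)) else (st.1, []))
      (new_list, [])
    if st.2 ≠ [] then st.1 ++ [String.ofList st.2] else st.1) []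

-- ===== PRECONDITION & SPEC =====
def Spec_list_alfanumeric (list : List String) (out : List String) : Prop := out = list_alfanumeric_alt list
instance (list : List String) (out : List String) : Decidable (Spec_list_alfanumeric list out) := by unfold Spec_list_alfanumeric; infer_instance

-- ===== CLAIM (what is proved, stated in full; the proofs are below) =====
def Claim_equal_list_alfanumeric : Prop := ∀ (list : List String), Dom_list_alfanumeric list → Spec_list_alfanumeric list (list_alfanumeric list)

-- ===== LEMMAS AND PROOFS =====

/-- Splitting on the single separator ' ', as a structural recursion. -/
def pvSplit1 : List Char → List (List Char)
  | [] => [[]]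
  | c :: rest => if c = ' ' then [] :: pvSplit1 rest else (pvSplit1 rest).modifyHead (c :: ·)

/-- The alphanumeric runs of `s`, with a pending buffer `buf`. -/
def pvRuns : List Char → List Char → List (List Char)
  | buf, [] => if buf = [] then [] else [buf]
  | buf, c :: rest =>
      if PySem.Chars.isalnum c then pvRuns (buf ++ [c]) rest
      else if buf = [] then pvRuns [] rest else buf :: pvRuns [] rest

def pvMask (s : List Char) : List Char := s.map (fun c => if PySem.Chars.isalnum c then c else ' ')

theorem pvGo_eq (fuel : Nat) : ∀ (l cur : List Char) (accs : List (List Char)), l.length < fuel →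
    PySem.Chars.splitOn.go [' '] fuel l cur accs = accs.reverse ++ (pvSplit1 l).modifyHead (cur.reverse ++ ·) := by
  induction fuel with
  | zero => intro l cur accs h; omega
  | succ n ih =>
    intro l cur accs h
    match l with
    | [] => simp [PySem.Chars.splitOn.go, pvSplit1]
    | c :: rest =>
      by_cases hc : c = ' '
      · subst hc
        rw [PySem.Chars.splitOn.go]
        rw [if_pos (by simp [List.isPrefixOf])]
        simp only [List.length_cons, List.length_nil, List.drop_succ_cons, List.drop_zero]
        rw [ih rest [] (cur.reverse :: accs) (by simpa using Nat.lt_of_succ_lt_succ h)]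
        simp only [pvSplit1, List.reverse_cons, List.reverse_nil, List.nil_append]
        cases pvSplit1 rest with
        | nil => simp [List.modifyHead]
        | cons a t => simp [List.modifyHead]
      · rw [PySem.Chars.splitOn.go]
        rw [if_neg (by simp; exact fun h' => hc h'.symm)]
        rw [ih rest (c :: cur) accs (by simpa using Nat.lt_of_succ_lt_succ h)]
        simp only [pvSplit1, if_neg hc]
        cases pvSplit1 rest with
        | nil => simp
        | cons a t => simp [List.modifyHead]

theorem pvSplitOn_eq (l : List Char) : PySem.Chars.splitOn l [' '] = pvSplit1 l := by
  rw [PySem.Chars.splitOn, pvGo_eq (l.length + 1) l [] [] (Nat.lt_succ_self _)]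
  cases pvSplit1 l with
  | nil => simp
  | cons a t => simp [List.modifyHead]

theorem pvSplit1_nospace (s : List Char) (h : ' ' ∉ s) : pvSplit1 s = [s] := by
  induction s with
  | nil => rfl
  | cons c rest ih =>
    have hc : c ≠ ' ' := fun hc => h (hc ▸ List.mem_cons_self ..)
    simp [pvSplit1, hc, ih (fun hm => h (List.mem_cons_of_mem _ hm)), List.modifyHead]

theorem pvNotIn (l : List Char) (h : PySem.Chars.isIn [' '] l = false) : ' ' ∉ l := by
  intro hm
  rw [PySem.Chars.isIn_eq_false_iff] at h
  obtain ⟨s, t, rfl⟩ := List.append_of_mem hm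
  exact h ⟨s, t, by simp⟩

theorem pvFilterFold (parts : List (List Char)) : ∀ nl : List String,
    parts.foldl (fun nl e => if e ≠ [] then nl ++ [String.ofList e] else nl) nl
      = nl ++ ((parts.filter (fun e => e ≠ [])).map String.ofList) := by
  induction parts with
  | nil => simp
  | cons p rest ih =>
    intro nl
    by_cases hp : p = []
    · subst hp
      rw [List.foldl_cons, if_neg (by simp), List.filter_cons, if_neg (by simp), ih]
    · rw [List.foldl_cons, if_pos hp, List.filter_cons, if_pos (by simpa using hp), List.map_cons, ih]
      simp

theorem pvCrux (s : List Char) : ∀ buf : List Char,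
    ((pvSplit1 (pvMask s)).modifyHead (buf ++ ·)).filter (fun e => e ≠ []) = pvRuns buf s := by
  induction s with
  | nil =>
    intro buf
    by_cases hb : buf = [] <;> simp [pvMask, pvSplit1, pvRuns, List.modifyHead, hb]
  | cons c rest ih =>
    intro buf
    by_cases hc : PySem.Chars.isalnum c = true
    · have hcs : c ≠ ' ' := by intro h; rw [h] at hc; exact absurd hc (by decide)
      have : pvMask (c :: rest) = c :: pvMask rest := by simp [pvMask, hc]
      rw [this]
      simp only [pvSplit1, if_neg hcs]
      rw [show ((pvSplit1 (pvMask rest)).modifyHead (c :: ·)).modifyHead (buf ++ ·)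
            = (pvSplit1 (pvMask rest)).modifyHead ((buf ++ [c]) ++ ·) by
        cases pvSplit1 (pvMask rest) with
        | nil => rfl
        | cons a t => simp [List.modifyHead]]
      rw [ih (buf ++ [c])]
      simp [pvRuns, hc]
    · have hc' : PySem.Chars.isalnum c = false := by simpa using hc
      have : pvMask (c :: rest) = ' ' :: pvMask rest := by simp [pvMask, hc']
      rw [this]
      rw [show pvSplit1 (' ' :: pvMask rest) = [] :: pvSplit1 (pvMask rest) from by
        simp [pvSplit1]]
      by_cases hb : buf = []
      · subst hb
        rw [show ((([] : List Char) :: pvSplit1 (pvMask rest)).modifyHead (([] : List Char) ++ ·))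
              = ([] : List Char) :: pvSplit1 (pvMask rest) by simp [List.modifyHead]]
        have := ih []
        rw [show (pvSplit1 (pvMask rest)).modifyHead (([] : List Char) ++ ·) = pvSplit1 (pvMask rest) by
          cases pvSplit1 (pvMask rest) with
          | nil => rfl
          | cons a t => simp [List.modifyHead]] at this
        simp only [pvRuns, hc', Bool.false_eq_true, if_false]
        rw [← this]
        simp
      · rw [show ((([] : List Char) :: pvSplit1 (pvMask rest)).modifyHead (buf ++ ·))
              = buf :: pvSplit1 (pvMask rest) by simp [List.modifyHead]]
        have := ih []
        rw [show (pvSplit1 (pvMask rest)).modifyHead (([] : List Char) ++ ·) = pvSplit1 (pvMask rest) by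
          cases pvSplit1 (pvMask rest) with
          | nil => rfl
          | cons a t => simp [List.modifyHead]] at this
        simp only [pvRuns, hc', Bool.false_eq_true, if_false, if_neg hb]
        rw [← this]
        simp [hb]

theorem pvMaskFold (s : List Char) : ∀ np : List Char,
    s.foldl (fun np caracter =>
      if PySem.Chars.isalpha caracter || PySem.Chars.isdigit caracter then np ++ [caracter]
      else np ++ [' ']) np = np ++ pvMask s := by
  induction s with
  | nil => simp [pvMask]
  | cons c rest ih =>
    intro np
    rw [List.foldl_cons]
    by_cases hc : (PySem.Chars.isalpha c || PySem.Chars.isdigit c) = true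
    · rw [if_pos hc, ih, show pvMask (c :: rest) = c :: pvMask rest from by
        simp only [pvMask, List.map_cons]
        rw [if_pos (show PySem.Chars.isalnum c = true from hc)]]
      simp
    · have hcf : (PySem.Chars.isalpha c || PySem.Chars.isdigit c) = false := by simpa using hc
      rw [if_neg (by simp [hcf]), ih, show pvMask (c :: rest) = ' ' :: pvMask rest from by
        simp only [pvMask, List.map_cons]
        rw [if_neg (show ¬ PySem.Chars.isalnum c = true from by
          simp [PySem.Chars.isalnum, hcf])]]
      simp

/-- A's per-word contribution is the alphanumeric runs of the word. -/
theorem pvStepA (palabra : String) (new_list : List String) :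
    (let nueva_palabra : List Char :=
      palabra.toList.foldl (fun np caracter =>
        if PySem.Chars.isalpha caracter || PySem.Chars.isdigit caracter then np ++ [caracter]
        else np ++ [' ']) []
    if nueva_palabra ≠ [] then
      if PySem.Chars.isIn [' '] nueva_palabra = false then
        new_list ++ [String.ofList nueva_palabra]
      else
        (PySem.Chars.splitOn nueva_palabra [' ']).foldl
          (fun nl elemento => if elemento ≠ [] then nl ++ [String.ofList elemento] else nl) new_list
    else new_list) = new_list ++ (pvRuns [] palabra.toList).map String.ofList := by
  have hmask := pvMaskFold palabra.toList []
  simp only [List.nil_append] at hmask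
  simp only [hmask]
  have hcrux := pvCrux palabra.toList []
  rw [show (pvSplit1 (pvMask palabra.toList)).modifyHead (([] : List Char) ++ ·)
        = pvSplit1 (pvMask palabra.toList) by
    cases pvSplit1 (pvMask palabra.toList) with
    | nil => rfl
    | cons a t => simp [List.modifyHead]] at hcrux
  by_cases hm : pvMask palabra.toList = []
  · have hs : palabra.toList = [] := by
      cases h : palabra.toList with
      | nil => rfl
      | cons a t => rw [h] at hm; simp [pvMask] at hm
    rw [hs]
    simp [pvMask, pvRuns]
  · rw [if_pos hm]
    by_cases hin : PySem.Chars.isIn [' '] (pvMask palabra.toList) = false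
    · rw [if_pos hin]
      rw [pvSplit1_nospace _ (pvNotIn _ hin)] at hcrux
      rw [← hcrux]
      simp [hm]
    · rw [if_neg hin, pvSplitOn_eq, pvFilterFold, ← hcrux]

/-- B's per-word contribution is the alphanumeric runs of the word. -/
theorem pvStepB (s : List Char) : ∀ (acc : List String) (buf : List Char),
    (let st := s.foldl (fun (st : List String × List Char) caracter =>
      if PySem.Chars.isalnum caracter then (st.1, st.2 ++ [caracter])
      else if st.2 ≠ [] then (st.1 ++ [String.ofList st.2], ([] : List Char)) else (st.1, []))
      (acc, buf)
    if st.2 ≠ [] then st.1 ++ [String.ofList st.2] else st.1)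
      = acc ++ (pvRuns buf s).map String.ofList := by
  induction s with
  | nil =>
    intro acc buf
    by_cases hb : buf = [] <;> simp [pvRuns, hb]
  | cons c rest ih =>
    intro acc buf
    by_cases hc : PySem.Chars.isalnum c = true
    · have h2 : pvRuns buf (c :: rest) = pvRuns (buf ++ [c]) rest := by simp [pvRuns, hc]
      have h3 := ih acc (buf ++ [c])
      simp only [List.foldl_cons, hc, if_true, h2]
      simpa using h3
    · have hc' : PySem.Chars.isalnum c = false := by simpa using hc
      by_cases hb : buf = []
      · subst hb
        have h2 : pvRuns ([] : List Char) (c :: rest) = pvRuns [] rest := by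
          simp [pvRuns, hc']
        have h3 := ih acc []
        simp only [List.foldl_cons, hc', h2]
        simpa using h3
      · have h2 : pvRuns buf (c :: rest) = buf :: pvRuns [] rest := by
          simp [pvRuns, hc', hb]
        have h3 := ih (acc ++ [String.ofList buf]) []
        simp only [List.foldl_cons, hc', h2]
        simpa [hb] using h3

theorem pvBoth (l : List String) : ∀ acc : List String,
    l.foldl (fun new_list palabra =>
      let nueva_palabra : List Char :=
        palabra.toList.foldl (fun np caracter =>
          if PySem.Chars.isalpha caracter || PySem.Chars.isdigit caracter then np ++ [caracter]
          else np ++ [' ']) []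
      if nueva_palabra ≠ [] then
        if PySem.Chars.isIn [' '] nueva_palabra = false then
          new_list ++ [String.ofList nueva_palabra]
        else
          (PySem.Chars.splitOn nueva_palabra [' ']).foldl
            (fun nl elemento => if elemento ≠ [] then nl ++ [String.ofList elemento] else nl) new_list
      else new_list) acc
    = l.foldl (fun new_list palabra =>
      let st := palabra.toList.foldl (fun (st : List String × List Char) caracter =>
        if PySem.Chars.isalnum caracter then (st.1, st.2 ++ [caracter])
        else if st.2 ≠ [] then (st.1 ++ [String.ofList st.2], ([] : List Char)) else (st.1, []))
        (new_list, [])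
      if st.2 ≠ [] then st.1 ++ [String.ofList st.2] else st.1) acc := by
  induction l with
  | nil => intro acc; rfl
  | cons w rest ih =>
    intro acc
    simp only [List.foldl_cons]
    rw [show _ = acc ++ (pvRuns [] w.toList).map String.ofList from pvStepA w acc,
        show _ = acc ++ (pvRuns [] w.toList).map String.ofList from pvStepB w.toList acc []]
    exact ih _

-- ===== VERDICT (by name: the statement is the Claim_ definition above) =====
theorem list_alfanumeric_spec : Claim_equal_list_alfanumeric := by
  intro list _
  unfold Spec_list_alfanumeric list_alfanumeric list_alfanumeric_alt
  exact pvBoth list []
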